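-- pv_equiv track=rewrite | github.com/a-shiro/Python-Exercises | Python Advanced/2. Tuples And Sets/Lab/05. SoftUni Party.py | sort_vips_and_regulars
-- ===== SOURCE A (Python) =====
-- def sort_vips_and_regulars(reservation_list):
--     vip_guests = []
--     regular_guests = []
--
--     for guest in reservation_list:
--         if guest[0].isdigit():
--             vip_guests.append(guest)
--         else:
--             regular_guests.append(guest)
--
--     return sorted(vip_guests), sorted(regular_guests)
-- ===== SOURCE B (Python) =====
-- def sort_vips_and_regulars(reservation_list):
--     ordered = sorted(reservation_list)
--     vip_guests = [guest for guest in ordered if guest[0].isdigit()]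
--     regular_guests = [guest for guest in ordered if not guest[0].isdigit()]
--     return vip_guests, regular_guests
-- ===== Notes on version B (the rewrite author's own statement) =====
-- stated objective: alternative
-- what changed: B sorts the whole list once and then filters the sorted list into VIPs and regulars (relying on the fact that filtering a sorted list yields a sorted list), instead of partitioning first with an accumulator loop and sorting each partition separately.
import Mathlib
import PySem

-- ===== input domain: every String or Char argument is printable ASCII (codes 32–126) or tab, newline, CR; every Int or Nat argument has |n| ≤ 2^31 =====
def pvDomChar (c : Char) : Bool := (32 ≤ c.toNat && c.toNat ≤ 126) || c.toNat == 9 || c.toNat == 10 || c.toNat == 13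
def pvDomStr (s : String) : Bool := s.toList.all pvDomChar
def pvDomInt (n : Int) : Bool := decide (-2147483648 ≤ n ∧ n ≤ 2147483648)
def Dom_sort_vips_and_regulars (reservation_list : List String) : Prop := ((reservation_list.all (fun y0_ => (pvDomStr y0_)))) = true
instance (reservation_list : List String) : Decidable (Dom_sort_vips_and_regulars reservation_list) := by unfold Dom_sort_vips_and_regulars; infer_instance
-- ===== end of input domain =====

-- B sorts the input once and filters the sorted list; A partitions with an accumulator loop and sorts each part.

-- ===== PORT A =====
-- guest[0].isdigit(): Python raises IndexError on guest = "" (excluded by Pre_); the none branch is unreachable under Pre_.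
def pvIsVip (guest : String) : Bool :=
  match PySem.Str.pyGet? guest 0 with
  | some c => PySem.Chars.isdigit c
  | none => false

def sort_vips_and_regulars (reservation_list : List String) : List String × List String :=
  let acc := reservation_list.foldl
    (fun (acc : List String × List String) guest =>
      if pvIsVip guest then (acc.1 ++ [guest], acc.2) else (acc.1, acc.2 ++ [guest]))
    ([], [])
  (PySem.List.sorted acc.1 (fun x => x) false, PySem.List.sorted acc.2 (fun x => x) false)

-- ===== PORT B =====
def sort_vips_and_regulars_alt (reservation_list : List String) : List String × List String :=
  let ordered := PySem.List.sorted reservation_list (fun x => x) false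
  (ordered.filter (fun guest => pvIsVip guest),
   ordered.filter (fun guest => !pvIsVip guest))

-- ===== PRECONDITION & SPEC =====
-- Pre_ excludes lists containing the empty string, on which A (and B) raise IndexError at guest[0].
def Pre_sort_vips_and_regulars (reservation_list : List String) : Prop :=
  ∀ s ∈ reservation_list, s ≠ ""
instance (reservation_list : List String) : Decidable (Pre_sort_vips_and_regulars reservation_list) := by
  unfold Pre_sort_vips_and_regulars; infer_instance

def pvWitness_sort_vips_and_regulars : List String := ["7even", "Alice", "3rd", "bob"]

def Spec_sort_vips_and_regulars (reservation_list : List String) (out : List String × List String) : Prop :=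
  out = sort_vips_and_regulars_alt reservation_list
instance (reservation_list : List String) (out : List String × List String) : Decidable (Spec_sort_vips_and_regulars reservation_list out) := by
  unfold Spec_sort_vips_and_regulars; infer_instance

-- ===== CLAIM =====
def Claim_equal_sort_vips_and_regulars : Prop :=
  ∀ (reservation_list : List String), Dom_sort_vips_and_regulars reservation_list →
    Pre_sort_vips_and_regulars reservation_list →
    Spec_sort_vips_and_regulars reservation_list (sort_vips_and_regulars reservation_list)

-- ===== LEMMAS AND PROOFS =====

-- A's accumulator loop computes the two filters of the input, in order.
lemma pvFoldl_partition (rs : List String) (a b : List String) :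
    rs.foldl
      (fun (acc : List String × List String) guest =>
        if pvIsVip guest then (acc.1 ++ [guest], acc.2) else (acc.1, acc.2 ++ [guest]))
      (a, b)
    = (a ++ rs.filter (fun g => pvIsVip g), b ++ rs.filter (fun g => !pvIsVip g)) := by
  induction rs generalizing a b with
  | nil => simp
  | cons x xs ih =>
    by_cases h : pvIsVip x <;> simp [List.foldl_cons, h, ih]

-- sorting a filter = filtering the sorted list
lemma pvSorted_filter (rs : List String) (p : String → Bool) :
    PySem.List.sorted (rs.filter p) (fun x => x) false
      = (PySem.List.sorted rs (fun x => x) false).filter p := by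
  apply PySem.List.sorted_id_eq_of_perm_of_pairwise
  · exact (PySem.List.sorted_perm rs (fun x => x) false).filter p
  · exact List.Pairwise.sublist List.filter_sublist (PySem.List.sorted_pairwise rs (fun x => x))

-- ===== VERDICT =====
theorem sort_vips_and_regulars_spec : Claim_equal_sort_vips_and_regulars := by
  intro rs _ _
  unfold Spec_sort_vips_and_regulars sort_vips_and_regulars sort_vips_and_regulars_alt
  simp only [pvFoldl_partition rs [] [], List.nil_append, pvSorted_filter]
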